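-- pv_equiv track=rewrite | github.com/suhail-1-2/Project-implementation | cropfert.py | get_modified_crop_type
-- ===== SOURCE A (Python) =====
-- def get_modified_crop_type(crop_type: str):
--     # Find the corresponding modified crop type from the mapping
--     # Crop Fertilizer Mapping
--     crop_fertilizer_mapping = {
--     "Paddy": ["rice"],
--     "Maize": ["maize"],
--     "Pulses": ["chickpea", "kidneybeans", "pigeonpeas", "mothbeans", "mungbean", "blackgram", "lentil"],
--     "Oil seeds": ["pomegranate", "banana", "mango", "grapes", "coconut"],
--     "Millets": ["millets"],
--     "Ground Nuts": [],
--     "Sugarcane": ["sugarcane"],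
--     "Cotton": ["cotton"],
--     "Tobacco": ["tobacco"],
--     "Barley": ["barley"],
--     "Wheat": ["wheat"],
--     "Fruits": ["watermelon", "muskmelon", "apple", "orange", "papaya"]
-- }
--
--
--     for main_crop, crops in crop_fertilizer_mapping.items():
--         if crop_type in crops:
--             return main_crop
--     return crop_type  # Return the original crop if no mapping is found
-- ===== SOURCE B (Python) =====
-- # Flat precomputed reverse table: each crop name maps directly to its category.
-- _REVERSE = {
--     "rice": "Paddy",
--     "maize": "Maize",
--     "chickpea": "Pulses", "kidneybeans": "Pulses", "pigeonpeas": "Pulses",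
--     "mothbeans": "Pulses", "mungbean": "Pulses", "blackgram": "Pulses", "lentil": "Pulses",
--     "pomegranate": "Oil seeds", "banana": "Oil seeds", "mango": "Oil seeds",
--     "grapes": "Oil seeds", "coconut": "Oil seeds",
--     "millets": "Millets",
--     "sugarcane": "Sugarcane",
--     "cotton": "Cotton",
--     "tobacco": "Tobacco",
--     "barley": "Barley",
--     "wheat": "Wheat",
--     "watermelon": "Fruits", "muskmelon": "Fruits", "apple": "Fruits",
--     "orange": "Fruits", "papaya": "Fruits",
-- }
--
-- def get_modified_crop_type(crop_type: str):
--     # One direct lookup in the flat crop -> category table; unknown crops pass through.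
--     return _REVERSE.get(crop_type, crop_type)
-- ===== Notes on version B (the rewrite author's own statement) =====
-- stated objective: simpler
-- what changed: A scans a nested category->crop-list mapping with a per-category membership test until a list contains the crop; B keeps a flat precomputed crop->category dictionary and answers with one direct lookup, no loop or membership test at call time.
import Mathlib
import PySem

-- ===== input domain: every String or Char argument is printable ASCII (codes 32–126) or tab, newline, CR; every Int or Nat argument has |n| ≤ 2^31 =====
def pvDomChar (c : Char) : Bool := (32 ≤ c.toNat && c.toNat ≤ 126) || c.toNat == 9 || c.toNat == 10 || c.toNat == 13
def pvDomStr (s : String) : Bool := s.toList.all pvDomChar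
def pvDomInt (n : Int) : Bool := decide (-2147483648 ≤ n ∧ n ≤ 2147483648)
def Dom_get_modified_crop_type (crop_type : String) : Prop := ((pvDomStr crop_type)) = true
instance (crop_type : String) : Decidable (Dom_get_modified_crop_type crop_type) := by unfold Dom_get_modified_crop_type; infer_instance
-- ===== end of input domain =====

-- B replaces A's per-call scan of the nested category→crop-list mapping by a flat
-- precomputed crop→category dictionary answered with one direct lookup (simpler).

-- ===== PORT A =====
-- the function-level mapping, in dict insertion order
def cropFertilizerMapping : List (String × List String) :=
  [("Paddy", ["rice"]),
   ("Maize", ["maize"]),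
   ("Pulses", ["chickpea", "kidneybeans", "pigeonpeas", "mothbeans", "mungbean", "blackgram", "lentil"]),
   ("Oil seeds", ["pomegranate", "banana", "mango", "grapes", "coconut"]),
   ("Millets", ["millets"]),
   ("Ground Nuts", []),
   ("Sugarcane", ["sugarcane"]),
   ("Cotton", ["cotton"]),
   ("Tobacco", ["tobacco"]),
   ("Barley", ["barley"]),
   ("Wheat", ["wheat"]),
   ("Fruits", ["watermelon", "muskmelon", "apple", "orange", "papaya"])]

-- A's for-loop with early return over the items
def loopA (crop_type : String) : List (String × List String) → String
  | [] => crop_type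
  | (main_crop, crops) :: rest =>
      if crop_type ∈ crops then main_crop else loopA crop_type rest

def get_modified_crop_type (crop_type : String) : String :=
  loopA crop_type cropFertilizerMapping

-- ===== PORT B =====
-- Source B's module-level flat dict literal _REVERSE
def reverseTable : PySem.Dict String String :=
  PySem.Dict.ofList
    [("rice", "Paddy"),
     ("maize", "Maize"),
     ("chickpea", "Pulses"), ("kidneybeans", "Pulses"), ("pigeonpeas", "Pulses"),
     ("mothbeans", "Pulses"), ("mungbean", "Pulses"), ("blackgram", "Pulses"), ("lentil", "Pulses"),
     ("pomegranate", "Oil seeds"), ("banana", "Oil seeds"), ("mango", "Oil seeds"),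
     ("grapes", "Oil seeds"), ("coconut", "Oil seeds"),
     ("millets", "Millets"),
     ("sugarcane", "Sugarcane"),
     ("cotton", "Cotton"),
     ("tobacco", "Tobacco"),
     ("barley", "Barley"),
     ("wheat", "Wheat"),
     ("watermelon", "Fruits"), ("muskmelon", "Fruits"), ("apple", "Fruits"),
     ("orange", "Fruits"), ("papaya", "Fruits")]

def get_modified_crop_type_alt (crop_type : String) : String :=
  reverseTable.getD crop_type crop_type

-- ===== PRECONDITION & SPEC =====
def Spec_get_modified_crop_type (crop_type : String) (out : String) : Prop := out = get_modified_crop_type_alt crop_type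
instance (crop_type : String) (out : String) : Decidable (Spec_get_modified_crop_type crop_type out) := by unfold Spec_get_modified_crop_type; infer_instance

-- ===== CLAIM (what is proved, stated in full; the proofs are below) =====
def Claim_equal_get_modified_crop_type : Prop := ∀ (crop_type : String), Dom_get_modified_crop_type crop_type → Spec_get_modified_crop_type crop_type (get_modified_crop_type crop_type)

-- ===== LEMMAS AND PROOFS =====

-- the flattened (crop, category) pairs of A's table, in scan order
def cropPairs (tbl : List (String × List String)) : List (String × String) :=
  tbl.flatMap (fun p => p.2.map (fun x => (x, p.1)))

-- A's scan returns the category of the first pair whose crop matches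
theorem find?_map_pair (c k : String) (crops : List String) :
    ((crops.map (fun x => (x, k))).find? (fun q => q.1 == c))
      = if c ∈ crops then some (c, k) else none := by
  induction crops with
  | nil => simp
  | cons x xs ih =>
      by_cases h : x = c
      · subst h; simp
      · simp only [List.map, List.find?, List.mem_cons]
        rw [show ((x, k).1 == c) = false by simpa using h, ih]
        simp [Ne.symm h]

theorem loopA_eq_find? (c : String) (tbl : List (String × List String)) :
    loopA c tbl = (((cropPairs tbl).find? (fun q => q.1 == c)).map (·.2)).getD c := by
  induction tbl with
  | nil => simp [loopA, cropPairs]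
  | cons p rest ih =>
      obtain ⟨k, crops⟩ := p
      simp only [loopA, cropPairs, List.flatMap_cons, List.find?_append, find?_map_pair]
      by_cases h : c ∈ crops
      · simp [h]
      · simpa [h, cropPairs] using ih

-- lookup in a literal Dict.mk = first match in the pair list
theorem get?_mk_eq_find? (c : String) (ps : List (String × String)) :
    (PySem.Dict.mk ps).get? c = ((ps.find? (fun q => q.1 == c)).map (·.2)) := by
  induction ps with
  | nil => simp [PySem.Dict.get?]
  | cons q rest ih =>
      obtain ⟨k, v⟩ := q
      rw [PySem.Dict.get?_mk_cons, List.find?]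
      by_cases h : k = c
      · simp [h]
      · rw [if_neg (by simpa using h), show ((k, v).1 == c) = false by simpa using h, ih]

-- B's dict literal has pairwise-distinct keys, so ofList keeps the list as written
theorem reverseTable_items :
    reverseTable = PySem.Dict.mk (cropPairs cropFertilizerMapping) := by decide

-- ===== VERDICT (by name: the statement is the Claim_ definition above) =====
theorem get_modified_crop_type_spec : Claim_equal_get_modified_crop_type := by
  intro c _
  unfold Spec_get_modified_crop_type get_modified_crop_type get_modified_crop_type_alt
  rw [loopA_eq_find?, reverseTable_items, PySem.Dict.getD_eq_get?_getD, get?_mk_eq_find?]
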